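-- pv_equiv track=rewrite | github.com/alang321/jetson_fisheye_calibration | asymm_circle_grid_pattern_finders/auto_asymm_circle_grid_finder.py | rotate_hex_grid
-- ===== SOURCE A (Python) =====
-- from typing import List, Dict, Set, Tuple, Optional
-- from typing import Optional, List, Tuple, Set
--
-- def rotate_hex_grid(
--     grid_points: Set[Tuple[int, int]],
--     steps: int
-- ) -> Set[Tuple[int, int]]:
--     """
--     Rotates a set of hexagonal grid points by a multiple of 60 degrees.
--
--     This function uses an axial coordinate system for input/output and temporarily
--     converts to a cube coordinate system for rotation, which simplifies the math.
--
--     Args: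
--         grid_points: A set of tuples, where each tuple is a (q, r) axial coordinate.
--                      In our case, this will be the (r, c) keys from your grid_map.
--         steps: The number of 60-degree clockwise rotations to perform.
--                For example, steps=1 is a 60-degree rotation, steps=3 is 180 degrees.
--
--     Returns:
--         A new set of tuples representing the rotated (q, r) coordinates.
--     """
--     rotated_points = set()
--
--     # Normalize steps to be within 0-5 range
--     steps = steps % 6
--
--     for q, r in grid_points:
--         # 1. Convert axial (q, r) to cube (x, y, z) coordinates
--         # In a cube system for a hex grid, x + y + z always equals 0.
--         x = q
--         z = r
--         y = -x - z
--
--         # 2. Perform rotation by shuffling cube coordinates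
--         # A 60-degree clockwise rotation is equivalent to shifting the cube coordinates.
--         for _ in range(steps):
--             x, y, z = -z, -x, -y
--
--         # 3. Convert back from cube to axial coordinates for the output
--         new_q = x
--         new_r = z
--         rotated_points.add((new_q, new_r))
--
--     return rotated_points
-- ===== SOURCE B (Python) =====
-- def rotate_hex_grid(grid_points, steps):
--     k = steps % 6
--     table = (
--         lambda q, r: (q, r),
--         lambda q, r: (-r, q + r),
--         lambda q, r: (-(q + r), q),
--         lambda q, r: (-q, -r),
--         lambda q, r: (r, -(q + r)),
--         lambda q, r: (q + r, -q),
--     )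
--     f = table[k]
--     return {f(q, r) for q, r in grid_points}
-- ===== Notes on version B (the rewrite author's own statement) =====
-- stated objective: simpler
-- what changed: Replaces the cube-coordinate conversion and the per-point loop of steps%6 single rotations with one closed-form axial linear map chosen from a table of the six 60-degree rotations.
import Mathlib
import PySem

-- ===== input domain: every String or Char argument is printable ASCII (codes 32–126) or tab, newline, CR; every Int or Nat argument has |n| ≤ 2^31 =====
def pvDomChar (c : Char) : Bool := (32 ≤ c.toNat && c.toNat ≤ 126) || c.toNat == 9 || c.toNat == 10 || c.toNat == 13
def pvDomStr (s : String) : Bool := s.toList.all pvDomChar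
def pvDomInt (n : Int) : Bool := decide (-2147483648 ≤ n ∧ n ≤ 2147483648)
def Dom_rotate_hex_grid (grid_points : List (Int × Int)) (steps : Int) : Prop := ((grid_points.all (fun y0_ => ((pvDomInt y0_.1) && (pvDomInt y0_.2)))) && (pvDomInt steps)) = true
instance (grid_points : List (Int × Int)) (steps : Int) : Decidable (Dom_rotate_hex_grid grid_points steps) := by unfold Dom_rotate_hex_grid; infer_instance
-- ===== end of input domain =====

-- B replaces A's cube-coordinate conversion and per-point rotation loop with one
-- closed-form axial linear map selected by steps % 6 (simpler, one pass, no inner loop).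

-- ===== PORT A =====
-- A: normalize steps%6, convert each axial point to cube coords, rotate by
-- iterating (x,y,z) := (-z,-x,-y) steps times, convert back, add to a set.
def rotate_hex_grid (grid_points : List (Int × Int)) (steps : Int) : List (Int × Int) :=
  let steps' := PySem.Int.mod steps 6
  grid_points.foldl
    (fun rotated_points p =>
      let x := p.1
      let z := p.2
      let y := -x - z
      let c := (PySem.List.pyRange 0 steps' 1).foldl
        (fun (t : Int × Int × Int) _ => (-t.2.2, -t.1, -t.2.1)) (x, y, z)
      PySem.Set.add rotated_points (c.1, c.2.2))
    PySem.Set.empty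

-- ===== PORT B =====
-- B: one closed-form linear map per point, selected by k = steps % 6.
def pvRotMap (k : Int) (p : Int × Int) : Int × Int :=
  let q := p.1
  let r := p.2
  if k = 1 then (-r, q + r)
  else if k = 2 then (-(q + r), q)
  else if k = 3 then (-q, -r)
  else if k = 4 then (r, -(q + r))
  else if k = 5 then (q + r, -q)
  else (q, r)

def rotate_hex_grid_alt (grid_points : List (Int × Int)) (steps : Int) : List (Int × Int) :=
  PySem.Set.ofList (grid_points.map (pvRotMap (PySem.Int.mod steps 6)))

-- ===== PRECONDITION & SPEC =====
def Spec_rotate_hex_grid (grid_points : List (Int × Int)) (steps : Int) (out : List (Int × Int)) : Prop := out = rotate_hex_grid_alt grid_points steps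
instance (grid_points : List (Int × Int)) (steps : Int) (out : List (Int × Int)) : Decidable (Spec_rotate_hex_grid grid_points steps out) := by unfold Spec_rotate_hex_grid; infer_instance

-- ===== CLAIM =====
def Claim_equal_rotate_hex_grid : Prop := ∀ (grid_points : List (Int × Int)) (steps : Int), Dom_rotate_hex_grid grid_points steps → Spec_rotate_hex_grid grid_points steps (rotate_hex_grid grid_points steps)

-- ===== LEMMAS AND PROOFS =====
-- A's inner cube-rotation loop equals the closed-form map, for 0 ≤ k < 6.
theorem pv_point_eq (k : Int) (hk0 : 0 ≤ k) (hk6 : k < 6) (p : Int × Int) :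
    (((PySem.List.pyRange 0 k 1).foldl
        (fun (t : Int × Int × Int) _ => (-t.2.2, -t.1, -t.2.1)) (p.1, -p.1 - p.2, p.2)).1,
     ((PySem.List.pyRange 0 k 1).foldl
        (fun (t : Int × Int × Int) _ => (-t.2.2, -t.1, -t.2.1)) (p.1, -p.1 - p.2, p.2)).2.2)
      = pvRotMap k p := by
  interval_cases k <;>
    simp [PySem.List.pyRange, pvRotMap, List.range_succ] <;>
    omega

theorem pv_mod6_bounds (steps : Int) :
    0 ≤ PySem.Int.mod steps 6 ∧ PySem.Int.mod steps 6 < 6 := by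
  have h : PySem.Int.mod steps 6 = steps % 6 := by
    simp [PySem.Int.mod, Int.fmod_eq_emod]
  rw [h]
  omega

theorem pv_foldl_eq (k : Int) (hk0 : 0 ≤ k) (hk6 : k < 6) (xs : List (Int × Int))
    (acc : List (Int × Int)) :
    xs.foldl
      (fun rotated_points p =>
        let x := p.1
        let z := p.2
        let y := -x - z
        let c := (PySem.List.pyRange 0 k 1).foldl
          (fun (t : Int × Int × Int) _ => (-t.2.2, -t.1, -t.2.1)) (x, y, z)
        PySem.Set.add rotated_points (c.1, c.2.2)) acc
    = xs.foldl (fun s p => PySem.Set.add s (pvRotMap k p)) acc := by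
  induction xs generalizing acc with
  | nil => rfl
  | cons p xs ih =>
      simp only [List.foldl_cons]
      rw [← pv_point_eq k hk0 hk6 p]
      exact ih _

-- ===== VERDICT =====
theorem rotate_hex_grid_spec : Claim_equal_rotate_hex_grid := by
  intro grid_points steps _
  unfold Spec_rotate_hex_grid rotate_hex_grid rotate_hex_grid_alt
  obtain ⟨h0, h6⟩ := pv_mod6_bounds steps
  rw [PySem.Set.ofList_eq_foldl, List.foldl_map]
  exact pv_foldl_eq _ h0 h6 grid_points PySem.Set.empty
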